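-- pv_equiv track=rewrite | github.com/Fhvch/PythonLab | Lab17/main.py | factorials_generator
-- ===== SOURCE A (Python) =====
-- def factorials_generator(n):
--     def factorial(num):
--         if num == 0 or num == 1:
--             return 1
--         result = 1
--         for i in range(2, num + 1):
--             result *= i
--         return result
--
--     for number in range(n + 1):
--         yield factorial(number)
-- ===== SOURCE B (Python) =====
-- def factorials_generator(n):
--     # Simpler/faster: maintain the factorial incrementally across yields (single pass).
--     result = 1
--     for number in range(n + 1):
--         if number >= 2:
--             result *= number
--         yield result
-- ===== Notes on version B (the rewrite author's own statement) =====
-- stated objective: faster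
-- what changed: B drops the nested factorial helper and maintains a single running product across yields, so each factorial costs one multiplication instead of a full inner loop.
import Mathlib
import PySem

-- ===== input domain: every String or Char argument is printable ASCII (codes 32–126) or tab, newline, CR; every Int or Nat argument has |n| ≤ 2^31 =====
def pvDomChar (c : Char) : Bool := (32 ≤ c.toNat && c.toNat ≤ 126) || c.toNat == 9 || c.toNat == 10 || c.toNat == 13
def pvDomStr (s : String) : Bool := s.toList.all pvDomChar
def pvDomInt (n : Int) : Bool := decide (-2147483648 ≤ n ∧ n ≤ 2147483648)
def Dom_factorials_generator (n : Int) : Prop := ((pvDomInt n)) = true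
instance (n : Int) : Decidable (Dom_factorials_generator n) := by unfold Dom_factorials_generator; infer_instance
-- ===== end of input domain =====

-- ===== PORT A =====
-- helper: the nested 'factorial' of A, transliterated
def pvFactorial (num : Int) : Int :=
  if num == 0 || num == 1 then 1
  else (PySem.List.pyRange 2 (num + 1) 1).foldl (fun result i => result * i) 1

def factorials_generator (n : Int) : List Int :=
  (PySem.List.pyRange 0 (n + 1) 1).map pvFactorial

-- ===== PORT B =====
-- B maintains a single running product across yields (one multiplication per element).
def factorials_generator_alt (n : Int) : List Int :=
  ((PySem.List.pyRange 0 (n + 1) 1).foldl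
    (fun (st : Int × List Int) number =>
      let result := if number ≥ 2 then st.1 * number else st.1
      (result, st.2 ++ [result]))
    (1, [])).2

-- ===== PRECONDITION & SPEC =====
def Spec_factorials_generator (n : Int) (out : List Int) : Prop := out = factorials_generator_alt n
instance (n : Int) (out : List Int) : Decidable (Spec_factorials_generator n out) := by unfold Spec_factorials_generator; infer_instance

-- ===== CLAIM (what is proved, stated in full; the proofs are below) =====
def Claim_equal_factorials_generator : Prop := ∀ (n : Int), Dom_factorials_generator n → Spec_factorials_generator n (factorials_generator n)

-- ===== LEMMAS AND PROOFS =====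
-- the recurrence satisfied by A's helper
theorem pvFactorial_step (a : Int) (h0 : 0 ≤ a) :
    pvFactorial a = if a ≥ 2 then pvFactorial (a - 1) * a else 1 := by
  by_cases h2 : a ≥ 2
  · simp only [pvFactorial, if_pos h2]
    have hne : ¬(a == 0 || a == 1) = true := by
      simp; omega
    have hne' : ¬((a - 1) == 0 || (a - 1) == 1) = true ∨ a = 2 := by
      by_cases h3 : a = 2
      · right; exact h3
      · left; simp; omega
    rw [if_neg hne]
    rcases hne' with h | rfl
    · rw [if_neg h]
      have hsplit : PySem.List.pyRange 2 (a + 1) 1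
          = PySem.List.pyRange 2 a 1 ++ [a] := by
        have := PySem.List.pyRange_one_succ_right (a := 2) (b := a) (by omega)
        simpa using this
      have : a - 1 + 1 = a := by omega
      rw [hsplit, List.foldl_append, this]
      simp
    · decide
  · have : (a == 0 || a == 1) = true := by simp; omega
    simp only [pvFactorial, if_pos this, if_neg h2]

-- 0! and 1! cases: pvFactorial (a-1) = 1 when a is 0 or 1
theorem pvFactorial_low (a : Int) (h : a = 0 ∨ a = 1) : pvFactorial (a - 1) = 1 := by
  rcases h with rfl | rfl <;> decide

-- loop invariant of B's fold: starting from (pvFactorial (a-1), acc) it appends the map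
theorem pvLoop_inv : ∀ (k : Nat) (a b : Int) (acc : List Int), 0 ≤ a → (b - a).toNat = k →
    ((PySem.List.pyRange a b 1).foldl
      (fun (st : Int × List Int) number =>
        let result := if number ≥ 2 then st.1 * number else st.1
        (result, st.2 ++ [result]))
      (pvFactorial (a - 1), acc)).2
    = acc ++ (PySem.List.pyRange a b 1).map pvFactorial := by
  intro k
  induction k with
  | zero =>
    intro a b acc ha hk
    rw [PySem.List.pyRange_one_eq_nil (by omega)]
    simp
  | succ k ih =>
    intro a b acc ha hk
    have hab : a < b := by omega
    rw [PySem.List.pyRange_one_cons hab]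
    simp only [List.foldl_cons, List.map_cons]
    have hr : (if a ≥ 2 then pvFactorial (a - 1) * a else pvFactorial (a - 1))
        = pvFactorial a := by
      by_cases h2 : a ≥ 2
      · rw [if_pos h2, pvFactorial_step a ha, if_pos h2]
      · rw [if_neg h2, pvFactorial_low a (by omega), pvFactorial_step a ha, if_neg h2]
    have ha1 : a + 1 - 1 = a := by omega
    have := ih (a + 1) b (acc ++ [pvFactorial a]) (by omega) (by omega)
    rw [ha1] at this
    simp only [hr]
    rw [this, List.append_assoc]
    simp

-- ===== VERDICT (by name: the statement is the Claim_ definition above) =====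
theorem factorials_generator_spec : Claim_equal_factorials_generator := by
  intro n _
  unfold Spec_factorials_generator factorials_generator factorials_generator_alt
  have h := pvLoop_inv ((n + 1) - 0).toNat 0 (n + 1) [] (by omega) rfl
  simp only [show (0 : Int) - 1 = -1 from rfl] at h
  have hf : pvFactorial (-1) = 1 := by decide
  rw [hf] at h
  simpa using h.symm
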